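-- pv_equiv track=rewrite | github.com/nuno-fao/FPRO | PE/PE2/genealogy.py | genealogy
-- ===== SOURCE A (Python) =====
-- def genealogy(l):
--     family = ["sibling","parent","cousin","grandparent"]
--     l = sorted(l, key=lambda x: x[0])
--     out = []
--     for elem in family:
--         for member in l:
--             if member[1]==elem:
--                 out.append(member)
--     return out
-- ===== SOURCE B (Python) =====
-- def genealogy(l):
--     sib, par, cou, gra = [], [], [], []
--     for m in sorted(l, key=lambda x: x[0]):
--         if m[1] == "sibling":
--             sib.append(m)
--         elif m[1] == "parent":
--             par.append(m)
--         elif m[1] == "cousin":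
--             cou.append(m)
--         elif m[1] == "grandparent":
--             gra.append(m)
--     return sib + par + cou + gra
-- ===== Notes on version B (the rewrite author's own statement) =====
-- stated objective: simpler
-- what changed: Replaces A's four full scans of the sorted list (one per relation type) with a single dispatch pass that routes each member into one of four explicit accumulator lists, then concatenates them in the fixed order.
import Mathlib
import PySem

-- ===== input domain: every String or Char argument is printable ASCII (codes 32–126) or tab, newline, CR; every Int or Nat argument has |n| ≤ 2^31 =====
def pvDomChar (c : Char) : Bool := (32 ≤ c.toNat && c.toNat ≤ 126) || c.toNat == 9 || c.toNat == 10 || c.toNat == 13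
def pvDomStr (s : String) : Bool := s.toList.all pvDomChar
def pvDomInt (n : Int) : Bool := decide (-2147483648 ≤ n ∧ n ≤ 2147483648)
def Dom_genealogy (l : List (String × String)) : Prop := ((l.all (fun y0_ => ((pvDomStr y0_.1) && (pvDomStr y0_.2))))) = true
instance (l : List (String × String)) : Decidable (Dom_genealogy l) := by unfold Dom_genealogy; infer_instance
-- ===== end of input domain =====

-- B replaces A's four full scans of the sorted list (one per relation type) with a single
-- dispatch pass into four explicit accumulator lists, concatenated in the fixed order (objective: simpler).

-- ===== PORT A =====
def genealogy (l : List (String × String)) : List (String × String) :=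
  let family : List String := ["sibling", "parent", "cousin", "grandparent"]
  let l' := PySem.List.sorted l (fun x => x.1) false
  family.foldl (fun out elem =>
    l'.foldl (fun out member =>
      if member.2 == elem then out ++ [member] else out) out) []

-- ===== PORT B =====
def genealogy_alt (l : List (String × String)) : List (String × String) :=
  let r := (PySem.List.sorted l (fun x => x.1) false).foldl
    (fun (acc : List (String × String) × List (String × String) × List (String × String) × List (String × String)) m =>
      if m.2 == "sibling" then (acc.1 ++ [m], acc.2.1, acc.2.2.1, acc.2.2.2)
      else if m.2 == "parent" then (acc.1, acc.2.1 ++ [m], acc.2.2.1, acc.2.2.2)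
      else if m.2 == "cousin" then (acc.1, acc.2.1, acc.2.2.1 ++ [m], acc.2.2.2)
      else if m.2 == "grandparent" then (acc.1, acc.2.1, acc.2.2.1, acc.2.2.2 ++ [m])
      else acc)
    ([], [], [], [])
  r.1 ++ r.2.1 ++ r.2.2.1 ++ r.2.2.2

-- ===== PRECONDITION & SPEC =====
def Spec_genealogy (l : List (String × String)) (out : List (String × String)) : Prop := out = genealogy_alt l
instance (l : List (String × String)) (out : List (String × String)) : Decidable (Spec_genealogy l out) := by unfold Spec_genealogy; infer_instance

-- ===== CLAIM (what is proved, stated in full; the proofs are below) =====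
def Claim_equal_genealogy : Prop := ∀ (l : List (String × String)), Dom_genealogy l → Spec_genealogy l (genealogy l)

-- ===== LEMMAS AND PROOFS =====

-- A's inner scan over the sorted list collects the filter by the current relation type.
theorem inner_scan (s : List (String × String)) (e : String) (out : List (String × String)) :
    s.foldl (fun out member => if member.2 == e then out ++ [member] else out) out
      = out ++ s.filter (fun m => m.2 == e) := by
  have h := PySem.List.foldl_append_if (fun m : String × String => m.2 == e) id s out
  simpa using h

-- B's dispatch fold: each accumulator collects exactly the filter of the processed list by its key.
theorem dispatch_fold (s : List (String × String))
    (a b c d : List (String × String)) :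
    s.foldl
      (fun (acc : List (String × String) × List (String × String) × List (String × String) × List (String × String)) m =>
        if m.2 == "sibling" then (acc.1 ++ [m], acc.2.1, acc.2.2.1, acc.2.2.2)
        else if m.2 == "parent" then (acc.1, acc.2.1 ++ [m], acc.2.2.1, acc.2.2.2)
        else if m.2 == "cousin" then (acc.1, acc.2.1, acc.2.2.1 ++ [m], acc.2.2.2)
        else if m.2 == "grandparent" then (acc.1, acc.2.1, acc.2.2.1, acc.2.2.2 ++ [m])
        else acc)
      (a, b, c, d)
      = (a ++ s.filter (fun m => m.2 == "sibling"),
         b ++ s.filter (fun m => m.2 == "parent"),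
         c ++ s.filter (fun m => m.2 == "cousin"),
         d ++ s.filter (fun m => m.2 == "grandparent")) := by
  induction s generalizing a b c d with
  | nil => simp
  | cons m t ih =>
    rw [List.foldl_cons]
    by_cases h1 : m.2 = "sibling"
    · rw [if_pos (by simp [h1]), ih]; simp [h1]
    · by_cases h2 : m.2 = "parent"
      · rw [if_neg (by simp [h1]), if_pos (by simp [h2]), ih]; simp [h1, h2]
      · by_cases h3 : m.2 = "cousin"
        · rw [if_neg (by simp [h1]), if_neg (by simp [h2]), if_pos (by simp [h3]), ih]
          simp [h1, h2, h3]
        · by_cases h4 : m.2 = "grandparent"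
          · rw [if_neg (by simp [h1]), if_neg (by simp [h2]), if_neg (by simp [h3]),
              if_pos (by simp [h4]), ih]
            simp [h1, h2, h3, h4]
          · rw [if_neg (by simp [h1]), if_neg (by simp [h2]), if_neg (by simp [h3]),
              if_neg (by simp [h4]), ih]
            simp [h1, h2, h3, h4]

-- ===== VERDICT (by name: the statement is the Claim_ definition above) =====
theorem genealogy_spec : Claim_equal_genealogy := by
  intro l _
  unfold Spec_genealogy genealogy genealogy_alt
  simp only [List.foldl_cons, List.foldl_nil, inner_scan, dispatch_fold, List.nil_append,
    List.append_assoc]
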